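-- pv_equiv track=rewrite | github.com/wojtek239/python--mentoring- | python_basic/week_4/training8/exc_6.py | count_digit_frequency
-- ===== SOURCE A (Python) =====
-- def count_digit_frequency(number):
--     number_str = str(number)
--     digit_frequency = {}
--
--     for digit in number_str:
--         if digit.isdigit():
--             if digit in digit_frequency:
--                 digit_frequency[digit] += 1
--             else:
--                 digit_frequency[digit] = 1
--     return digit_frequency
-- ===== SOURCE B (Python) =====
-- def count_digit_frequency(number):
--     number_str = str(number)
--     return {ch: number_str.count(ch)
--             for ch in dict.fromkeys(number_str) if ch.isdigit()}
-- ===== Notes on version B (the rewrite author's own statement) =====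
-- stated objective: alternative
-- what changed: A builds the frequency dict incrementally, testing membership and updating a counter per character; B first deduplicates the characters of str(number) in first-occurrence order (dict.fromkeys), filters the digits, and obtains each count with str.count in a comprehension.
import Mathlib
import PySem

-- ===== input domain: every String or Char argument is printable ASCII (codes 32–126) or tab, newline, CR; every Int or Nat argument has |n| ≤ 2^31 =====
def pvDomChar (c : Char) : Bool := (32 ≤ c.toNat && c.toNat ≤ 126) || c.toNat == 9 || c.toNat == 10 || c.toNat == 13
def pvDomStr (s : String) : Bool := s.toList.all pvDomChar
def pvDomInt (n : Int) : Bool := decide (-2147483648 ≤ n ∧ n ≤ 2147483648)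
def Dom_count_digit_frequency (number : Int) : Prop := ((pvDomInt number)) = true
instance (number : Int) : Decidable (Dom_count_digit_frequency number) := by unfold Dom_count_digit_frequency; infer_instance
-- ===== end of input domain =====

-- B replaces A's one-char-at-a-time counting dict with a two-phase pass: dedup the characters of
-- str(number) in first-occurrence order, then read each digit's multiplicity off str.count (objective: alternative).

-- ===== PORT A =====
def count_digit_frequency (number : Int) : List (String × Int) :=
  let numberStr := PySem.Int.toChars number
  (numberStr.foldl
    (fun digit_frequency digit =>
      if PySem.Chars.isdigit digit then
        if digit_frequency.contains (String.ofList [digit]) then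
          digit_frequency.modify (String.ofList [digit]) 0 (· + 1)
        else
          digit_frequency.insert (String.ofList [digit]) 1
      else digit_frequency)
    PySem.Dict.empty).items

-- ===== PORT B =====
def count_digit_frequency_alt (number : Int) : List (String × Int) :=
  let numberStr := PySem.Int.toChars number
  ((PySem.List.dedup numberStr).filter (fun ch => PySem.Chars.isdigit ch)).map
    (fun ch => (String.ofList [ch], (PySem.Chars.count numberStr [ch] : Int)))

-- ===== PRECONDITION & SPEC =====
def Spec_count_digit_frequency (number : Int) (out : List (String × Int)) : Prop := out = count_digit_frequency_alt number
instance (number : Int) (out : List (String × Int)) : Decidable (Spec_count_digit_frequency number out) := by unfold Spec_count_digit_frequency; infer_instance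

-- ===== CLAIM (what is proved, stated in full; the proofs are below) =====
def Claim_equal_count_digit_frequency : Prop := ∀ (number : Int), Dom_count_digit_frequency number → Spec_count_digit_frequency number (count_digit_frequency number)

-- ===== LEMMAS AND PROOFS =====

-- s.count(sub) for a single-character sub is the character's multiplicity
theorem pvCountGo_singleton (c : Char) : ∀ (fuel : Nat) (l : List Char) (acc : Nat),
    l.length ≤ fuel → PySem.Chars.count.go [c] fuel l acc = acc + l.count c := by
  intro fuel
  induction fuel with
  | zero => intro l acc h; cases l with
      | nil => simp [PySem.Chars.count.go]
      | cons x t => simp at h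
  | succ n ih =>
      intro l acc h
      cases l with
      | nil => simp [PySem.Chars.count.go]
      | cons x t =>
          simp only [PySem.Chars.count.go]
          by_cases hx : x = c
          · subst hx
            simp [List.isPrefixOf, ih t (acc + 1) (by simpa using h)]
            omega
          · have : List.isPrefixOf [c] (x :: t) = false := by
              simp [List.isPrefixOf]; exact fun h' => (hx h'.symm).elim
            simp [this, ih t acc (by simpa using h), hx]

theorem pvCount_singleton (cs : List Char) (c : Char) :
    PySem.Chars.count cs [c] = cs.count c := by
  simp [PySem.Chars.count, pvCountGo_singleton c cs.length cs 0 le_rfl]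

-- the one-char-string key is injective
theorem pvKey_injective : Function.Injective (fun c : Char => String.ofList [c]) := by
  intro a b h
  have h' := congrArg String.toList h
  simp at h'
  exact h'

-- first-time insertion with value 1 is the counter step
theorem pvModify_of_not_contains (d : PySem.Dict String Int) (k : String)
    (h : d.contains k = false) : d.insert k 1 = d.modify k 0 (· + 1) := by
  simp [PySem.Dict.modify, PySem.Dict.insert, h, PySem.Dict.getD_of_not_contains]

-- Set.ofList's fold commutes with filter
theorem pvFoldlAdd_filter (p : Char → Bool) : ∀ (cs t : List Char),
    (cs.filter p).foldl PySem.Set.add (t.filter p) = (cs.foldl PySem.Set.add t).filter p := by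
  intro cs
  induction cs with
  | nil => intro t; simp
  | cons c cs ih =>
      intro t
      have hstep : ∀ (hp : p c = true),
          List.filter p (PySem.Set.add t c) = PySem.Set.add (List.filter p t) c := by
        intro hp
        by_cases hm : c ∈ t
        · have : c ∈ List.filter p t := List.mem_filter.mpr ⟨hm, hp⟩
          simp [PySem.Set.add, hm, this]
        · have : c ∉ List.filter p t := fun h => hm (List.mem_filter.mp h).1
          simp [PySem.Set.add, hm, this, List.filter_append, hp]
      have hstep' : ∀ (hp : p c = false),
          List.filter p (PySem.Set.add t c) = List.filter p t := by
        intro hp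
        by_cases hm : c ∈ t
        · simp [PySem.Set.add, hm]
        · simp [PySem.Set.add, hm, List.filter_append, hp]
      by_cases hp : p c = true
      · rw [List.filter_cons_of_pos hp, List.foldl_cons, List.foldl_cons,
            ← hstep hp, ih (PySem.Set.add t c)]
      · have hp' : p c = false := by simpa using hp
        rw [List.filter_cons_of_neg (by simp [hp']), List.foldl_cons,
            ← hstep' hp', ih (PySem.Set.add t c)]

-- Set.ofList's fold commutes with the injective key map
theorem pvFoldlAdd_map : ∀ (cs t : List Char),
    ((cs.map (fun c : Char => String.ofList [c])).foldl PySem.Set.add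
      (t.map (fun c : Char => String.ofList [c])))
      = (cs.foldl PySem.Set.add t).map (fun c : Char => String.ofList [c]) := by
  intro cs
  induction cs with
  | nil => intro t; simp
  | cons c cs ih =>
      intro t
      have hex : (∃ a ∈ t, String.ofList [a] = String.ofList [c]) ↔ c ∈ t :=
        ⟨fun ⟨a, ha, he⟩ => pvKey_injective he ▸ ha, fun h => ⟨c, h, rfl⟩⟩
      have hstep : PySem.Set.add (t.map (fun c : Char => String.ofList [c])) (String.ofList [c])
          = (PySem.Set.add t c).map (fun c : Char => String.ofList [c]) := by
        by_cases hm : c ∈ t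
        · simp [PySem.Set.add, hex, hm]
        · simp [PySem.Set.add, hex, hm]
      simp only [List.map_cons, List.foldl_cons]
      rw [hstep, ih]

theorem pvOfList_filter_map (p : Char → Bool) (cs : List Char) :
    PySem.Set.ofList ((cs.filter p).map (fun c : Char => String.ofList [c]))
      = ((PySem.Set.ofList cs).filter p).map (fun c : Char => String.ofList [c]) := by
  have h1 := pvFoldlAdd_map (cs.filter p) []
  have h2 := pvFoldlAdd_filter p cs []
  simp only [List.map_nil, List.filter_nil] at h1 h2
  simp only [PySem.Set.ofList, PySem.Set.empty]
  rw [h1, h2]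

-- the heart of the equivalence, over an arbitrary character list
theorem pvMain (cs : List Char) :
    (cs.foldl
      (fun digit_frequency digit =>
        if PySem.Chars.isdigit digit then
          if digit_frequency.contains (String.ofList [digit]) then
            digit_frequency.modify (String.ofList [digit]) 0 (· + 1)
          else
            digit_frequency.insert (String.ofList [digit]) 1
        else digit_frequency)
      (PySem.Dict.empty : PySem.Dict String Int)).items
    = ((PySem.List.dedup cs).filter (fun ch => PySem.Chars.isdigit ch)).map
        (fun ch => (String.ofList [ch], (PySem.Chars.count cs [ch] : Int))) := by
  set p : Char → Bool := PySem.Chars.isdigit with hp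
  -- A's loop is the counter over the digit characters mapped to one-char strings
  have hbody : cs.foldl
      (fun (digit_frequency : PySem.Dict String Int) digit =>
        if p digit then
          if digit_frequency.contains (String.ofList [digit]) then
            digit_frequency.modify (String.ofList [digit]) 0 (· + 1)
          else
            digit_frequency.insert (String.ofList [digit]) 1
        else digit_frequency)
      PySem.Dict.empty
      = PySem.Dict.counter ((cs.filter p).map (fun c : Char => String.ofList [c])) := by
    rw [PySem.Dict.counter_eq_foldl, List.foldl_map, List.foldl_filter]
    apply PySem.List.foldl_congr_mem
    intro d c _
    by_cases hpc : p c = true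
    · simp only [hpc, if_pos]
      by_cases hc : d.contains (String.ofList [c]) = true
      · simp [hc]
      · have hc' : d.contains (String.ofList [c]) = false := by simpa using hc
        simp [hc', pvModify_of_not_contains d (String.ofList [c]) hc']
    · have : p c = false := by simpa using hpc
      simp [this]
  rw [hbody, PySem.Dict.items_counter, pvOfList_filter_map, List.map_map,
      PySem.List.dedup_eq_ofList]
  apply List.map_congr_left
  intro c hc
  have hpc : p c = true := (List.mem_filter.mp hc).2
  simp only [Function.comp]
  refine congrArg (fun z : Nat => (String.ofList [c], (z : Int))) ?_
  rw [pvCount_singleton, List.count_map_of_injective _ _ pvKey_injective,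
      List.count_filter hpc]

-- ===== VERDICT (by name: the statement is the Claim_ definition above) =====
theorem count_digit_frequency_spec : Claim_equal_count_digit_frequency := by
  intro number _
  show count_digit_frequency number = count_digit_frequency_alt number
  exact pvMain (PySem.Int.toChars number)
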